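-- pv_equiv track=rewrite | github.com/DancingOnAir/LeetcodePythonSolution | String/1616_split_two_strings_to_make_palindrome.py | checkPalindromeFormation1
-- ===== SOURCE A (Python) =====
-- def checkPalindromeFormation1(a: str, b: str) -> bool:
--     n = len(a)
--     if n == 1:
--         return True
--
--     i, j = 0, n - 1
--     while i < j and a[i] == b[j]:
--         i += 1
--         j -= 1
--     s1, s2 = a[i: j + 1], b[i: j + 1]
--
--     i, j = 0, n - 1
--     while i < j and b[i] == a[j]:
--         i += 1
--         j -= 1
--     s3, s4 = b[i: j + 1], a[i : j + 1]
--
--     return any(s == s[::-1] for s in (s1, s2, s3, s4))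
-- ===== SOURCE B (Python) =====
-- def _pal(s):
--     return s == s[::-1]
--
--
-- def checkPalindromeFormation1(a: str, b: str) -> bool:
--     # Brute force over every split point: a-prefix + b-suffix or b-prefix + a-suffix.
--     n = len(a)
--     b = b[:n]
--     return any(_pal(a[:i] + b[i:]) or _pal(b[:i] + a[i:]) for i in range(n + 1))
-- ===== Notes on version B (the rewrite author's own statement) =====
-- stated objective: alternative
-- what changed: Replaces the greedy two-pointer prefix/suffix match plus middle-palindrome tests by a direct brute force over every split point i, testing whether a[:i]+b[i:] or b[:i]+a[i:] is a palindrome; this is the problem's defining condition, traded for quadratic cost where A is linear.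
import Mathlib
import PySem

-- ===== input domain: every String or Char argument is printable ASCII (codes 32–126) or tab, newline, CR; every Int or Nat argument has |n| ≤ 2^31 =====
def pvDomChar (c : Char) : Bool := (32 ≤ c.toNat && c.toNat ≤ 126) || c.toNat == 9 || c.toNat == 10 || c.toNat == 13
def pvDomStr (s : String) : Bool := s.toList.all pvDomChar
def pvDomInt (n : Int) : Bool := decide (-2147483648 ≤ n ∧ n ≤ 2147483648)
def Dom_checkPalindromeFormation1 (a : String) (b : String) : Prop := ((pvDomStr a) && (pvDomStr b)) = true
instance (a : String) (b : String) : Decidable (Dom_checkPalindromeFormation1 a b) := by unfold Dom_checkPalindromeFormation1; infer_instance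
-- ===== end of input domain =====

-- B replaces A's greedy two-pointer matching by a brute force over every split point
-- (objective: alternative; B is the problem's defining condition, at quadratic cost where A is linear).

-- ===== PORT A =====
-- the while loop 'while i < j and a[i] == b[j]: i += 1; j -= 1'; A only reads nonnegative
-- indices here, so pyGetD (IndexError excluded by Pre_) is exact
def pvLoopA (x y : List Char) (i j : Int) : Int × Int :=
  if h : i < j ∧ PySem.List.pyGetD x i ' ' = PySem.List.pyGetD y j ' ' then
    pvLoopA x y (i + 1) (j - 1)
  else (i, j)
termination_by (j - i).toNat
decreasing_by omega

def checkPalindromeFormation1 (a : String) (b : String) : Bool :=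
  let al := a.toList
  let bl := b.toList
  let n : Int := al.length
  if n = 1 then true
  else
    let p := pvLoopA al bl 0 (n - 1)
    let s1 := PySem.List.slice al (some p.1) (some (p.2 + 1))
    let s2 := PySem.List.slice bl (some p.1) (some (p.2 + 1))
    let q := pvLoopA bl al 0 (n - 1)
    let s3 := PySem.List.slice bl (some q.1) (some (q.2 + 1))
    let s4 := PySem.List.slice al (some q.1) (some (q.2 + 1))
    -- s == s[::-1]; exact by PySem.List.slice?_none_none_neg_one (s[::-1] = reverse)
    (s1 == s1.reverse) || (s2 == s2.reverse) || (s3 == s3.reverse) || (s4 == s4.reverse)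

-- ===== PORT B =====
-- _pal(s) = (s == s[::-1]); s[::-1] is reverse (PySem.List.slice?_none_none_neg_one)
def pvPal (s : List Char) : Bool := s == s.reverse

-- b = b[:n]; any(_pal(a[:i] + b[i:]) or _pal(b[:i] + a[i:]) for i in range(n + 1));
-- the slice bounds i are the nonnegative 0..n, so a[:i] = take i and b[i:] = drop i exactly
def checkPalindromeFormation1_alt (a : String) (b : String) : Bool :=
  let al := a.toList
  let n := al.length
  let bl := b.toList.take n
  (List.range (n + 1)).any (fun i =>
    pvPal (al.take i ++ bl.drop i) || pvPal (bl.take i ++ al.drop i))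

-- ===== PRECONDITION & SPEC =====
-- Pre_ excludes exactly the inputs where A raises IndexError (len(a) ≥ 2 and len(b) < len(a):
-- the first loop's condition evaluates b[len(a)-1]); B returns the brute-force answer for
-- (a, b[:len(a)]) there.
def Pre_checkPalindromeFormation1 (a : String) (b : String) : Prop :=
  a.toList.length ≤ 1 ∨ a.toList.length ≤ b.toList.length
instance (a : String) (b : String) : Decidable (Pre_checkPalindromeFormation1 a b) := by
  unfold Pre_checkPalindromeFormation1; infer_instance

def pvWitness_checkPalindromeFormation1 : String × String := ("ab", "ba")

def Spec_checkPalindromeFormation1 (a : String) (b : String) (out : Bool) : Prop := out = checkPalindromeFormation1_alt a b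
instance (a : String) (b : String) (out : Bool) : Decidable (Spec_checkPalindromeFormation1 a b out) := by unfold Spec_checkPalindromeFormation1; infer_instance

-- ===== CLAIM (what is proved, stated in full; the proofs are below) =====
def Claim_equal_checkPalindromeFormation1 : Prop := ∀ (a : String) (b : String), Dom_checkPalindromeFormation1 a b → Pre_checkPalindromeFormation1 a b → Spec_checkPalindromeFormation1 a b (checkPalindromeFormation1 a b)

-- ===== LEMMAS AND PROOFS =====

-- characters by total Nat indexing (default ' ', as pyGetD/getD)
def chD (s : List Char) (p : Nat) : Char := s.getD p ' '
-- the character of a[:i] + y[i:] at position p (both lists of length n, i ≤ n)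
def mixc (x y : List Char) (i p : Nat) : Char := if p < i then chD x p else chD y p
-- 'x[:i] + y[i:] is a palindrome', character-wise
def MixPal (x y : List Char) (n i : Nat) : Prop :=
  ∀ p, p < n → mixc x y i p = mixc x y i (n - 1 - p)
-- 'the centered window s[k:n-k] is a palindrome', character-wise
def PalC (s : List Char) (k n : Nat) : Prop :=
  ∀ p, k ≤ p → p < n - k → chD s p = chD s (n - 1 - p)

-- (s == s.reverse) character-wise
theorem pal_iff (s : List Char) :
    (s == s.reverse) = true ↔ ∀ p, p < s.length → chD s p = chD s (s.length - 1 - p) := by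
  rw [beq_iff_eq]
  constructor
  · intro h p hp
    have h1 : s[p]? = s.reverse[p]? := by rw [← h]
    rw [List.getElem?_reverse hp] at h1
    simp only [chD, List.getD_eq_getElem?_getD, h1]
  · intro h
    apply List.ext_getElem (by simp)
    intro i h1 h2
    rw [List.getElem_reverse]
    have := h i h1
    simp only [chD, List.getD_eq_getElem?_getD] at this
    rw [List.getElem?_eq_getElem h1, List.getElem?_eq_getElem (by omega : s.length - 1 - i < s.length)] at this
    simpa using this

theorem mix_len (x y : List Char) (n i : Nat) (hx : x.length = n) (hy : y.length = n)
    (hi : i ≤ n) : (x.take i ++ y.drop i).length = n := by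
  simp [hx, hy]; omega

theorem mix_chD (x y : List Char) (n i p : Nat) (hx : x.length = n) (hy : y.length = n)
    (hi : i ≤ n) (_hp : p < n) :
    chD (x.take i ++ y.drop i) p = mixc x y i p := by
  unfold mixc
  rcases Nat.lt_or_ge p i with h | h
  · rw [if_pos h]
    simp only [chD, List.getD_eq_getElem?_getD, List.getElem?_append, List.length_take, hx,
      List.getElem?_take]
    rw [if_pos (by omega), if_pos h]
  · rw [if_neg (by omega)]
    simp only [chD, List.getD_eq_getElem?_getD, List.getElem?_append, List.length_take, hx,
      List.getElem?_drop]
    rw [if_neg (by omega)]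
    have e : i + (p - min i n) = p := by omega
    rw [e]

theorem mixpal_iff (x y : List Char) (n i : Nat) (hx : x.length = n) (hy : y.length = n)
    (hi : i ≤ n) :
    pvPal (x.take i ++ y.drop i) = true ↔ MixPal x y n i := by
  unfold pvPal MixPal
  rw [pal_iff, mix_len x y n i hx hy hi]
  constructor
  · intro h p hp
    have := h p hp
    rwa [mix_chD x y n i p hx hy hi hp, mix_chD x y n i _ hx hy hi (by omega)] at this
  · intro h p hp
    rw [mix_chD x y n i p hx hy hi hp, mix_chD x y n i _ hx hy hi (by omega)]
    exact h p hp

-- A's slice s[k : n-k] palindrome test, character-wise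
theorem slicepal_iff (s : List Char) (k n : Nat) (h2 : 2 * k ≤ n) (hlen : n - k ≤ s.length) :
    ((PySem.List.slice s (some (k : Int)) (some ((n - k : Nat) : Int)) ==
      (PySem.List.slice s (some (k : Int)) (some ((n - k : Nat) : Int))).reverse) = true)
    ↔ PalC s k n := by
  rw [PySem.List.slice_natCast, pal_iff]
  have hlw : (List.take (n - k - k) (List.drop k s)).length = n - 2 * k := by
    simp; omega
  have hch : ∀ q, q < n - 2 * k →
      chD (List.take (n - k - k) (List.drop k s)) q = chD s (k + q) := by
    intro q hq
    simp only [chD, List.getD_eq_getElem?_getD, List.getElem?_take, List.getElem?_drop]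
    rw [if_pos (by omega)]
  rw [hlw]
  unfold PalC
  constructor
  · intro h p hkp hpn
    have hq := h (p - k) (by omega)
    rw [hch _ (by omega), hch _ (by omega)] at hq
    have e1 : k + (p - k) = p := by omega
    have e2 : k + (n - 2 * k - 1 - (p - k)) = n - 1 - p := by omega
    rwa [e1, e2] at hq
  · intro h q hq
    rw [hch _ hq, hch _ (by omega)]
    have := h (k + q) (by omega) (by omega)
    have e2 : k + (n - 2 * k - 1 - q) = n - 1 - (k + q) := by omega
    rwa [e2]

-- characterization of A's greedy loop started at (i, n-1-i)
theorem loopA_char (x y : List Char) (n : Nat) (fuel : Nat) :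
    ∀ i : Nat, n - 2 * i ≤ fuel → 2 * i ≤ n →
    ∃ k : Nat, i ≤ k ∧ 2 * k ≤ n ∧
      pvLoopA x y (i : Int) ((n : Int) - 1 - (i : Int)) = ((k : Int), (n : Int) - 1 - (k : Int)) ∧
      (∀ p : Nat, i ≤ p → p < k → chD x p = chD y (n - 1 - p)) ∧
      (n ≤ 2 * k + 1 ∨ chD x k ≠ chD y (n - 1 - k)) := by
  induction fuel with
  | zero =>
      intro i hf h2
      refine ⟨i, le_refl i, h2, ?_, by omega, by omega⟩
      rw [pvLoopA]
      rw [dif_neg (by rintro ⟨h1, -⟩; omega)]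
  | succ m ih =>
      intro i hf h2
      by_cases hlt : 2 * i + 1 < n
      · by_cases heq : chD x i = chD y (n - 1 - i)
        · obtain ⟨k, hik, hk2, hrec, hmatch, hstop⟩ := ih (i + 1) (by omega) (by omega)
          refine ⟨k, by omega, hk2, ?_, ?_, hstop⟩
          · rw [pvLoopA]
            rw [dif_pos ?_]
            · have e1 : (i : Int) + 1 = ((i + 1 : Nat) : Int) := by omega
              have e2 : (n : Int) - 1 - (i : Int) - 1 = (n : Int) - 1 - ((i + 1 : Nat) : Int) := by
                omega
              rw [e1, e2, hrec]
            · constructor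
              · omega
              · have e : (n : Int) - 1 - (i : Int) = ((n - 1 - i : Nat) : Int) := by omega
                rw [e, PySem.List.pyGetD_natCast, PySem.List.pyGetD_natCast]
                exact heq
          · intro p hip hpk
            rcases Nat.eq_or_lt_of_le hip with h | h
            · rw [← h]; exact heq
            · exact hmatch p h hpk
        · refine ⟨i, le_refl i, h2, ?_, by omega, Or.inr heq⟩
          rw [pvLoopA]
          rw [dif_neg ?_]
          rintro ⟨-, hc⟩
          apply heq
          have e : (n : Int) - 1 - (i : Int) = ((n - 1 - i : Nat) : Int) := by omega
          rw [e, PySem.List.pyGetD_natCast, PySem.List.pyGetD_natCast] at hc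
          exact hc
      · refine ⟨i, le_refl i, h2, ?_, by omega, by omega⟩
        rw [pvLoopA]
        rw [dif_neg (by rintro ⟨h1, -⟩; omega)]

-- if the half below the middle matches, the whole mirror condition holds
theorem mixpal_of_half (x y : List Char) (n i : Nat)
    (h : ∀ p, p < n → 2 * p + 1 ≤ n → mixc x y i p = mixc x y i (n - 1 - p)) :
    MixPal x y n i := by
  intro p hp
  by_cases hhalf : 2 * p + 1 ≤ n
  · exact h p hp hhalf
  · have := h (n - 1 - p) (by omega) (by omega)
    have e : n - 1 - (n - 1 - p) = p := by omega
    rw [e] at this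
    exact this.symm

-- greedy match + palindromic middle ⇒ some split works (the split is k or n-k)
theorem fwd (x y : List Char) (n k : Nat) (h2 : 2 * k ≤ n)
    (hm : ∀ p, p < k → chD x p = chD y (n - 1 - p))
    (hp : PalC x k n ∨ PalC y k n) :
    ∃ i, i ≤ n ∧ MixPal x y n i := by
  rcases hp with hp | hp
  · refine ⟨n - k, by omega, mixpal_of_half x y n (n - k) ?_⟩
    intro p hpn hhalf
    unfold mixc
    rcases Nat.lt_or_ge p k with hpk | hpk
    · rw [if_pos (by omega), if_neg (by omega)]
      exact hm p hpk
    · rw [if_pos (by omega), if_pos (by omega)]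
      exact hp p hpk (by omega)
  · refine ⟨k, by omega, mixpal_of_half x y n k ?_⟩
    intro p hpn hhalf
    unfold mixc
    rcases Nat.lt_or_ge p k with hpk | hpk
    · rw [if_pos hpk, if_neg (by omega)]
      exact hm p hpk
    · rw [if_neg (by omega), if_neg (by omega)]
      exact hp p hpk (by omega)

-- a working split ⇒ the greedy stopping point has a palindromic middle in x or y
theorem bwd (x y : List Char) (n k i : Nat) (hi : i ≤ n) (h2 : 2 * k ≤ n)
    (hstop : n ≤ 2 * k + 1 ∨ chD x k ≠ chD y (n - 1 - k))
    (hmix : MixPal x y n i) : PalC x k n ∨ PalC y k n := by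
  have hk : min i (n - i) ≤ k := by
    rcases Nat.lt_or_ge k (min i (n - i)) with hc | hc
    swap
    · exact hc
    exfalso
    have hki : k < i := by omega
    have hkni : k < n - i := by omega
    have hkn : k < n := by omega
    have := hmix k hkn
    unfold mixc at this
    rw [if_pos hki, if_neg (by omega)] at this
    rcases hstop with h | h
    · omega
    · exact h this
  rcases Nat.lt_or_ge n (2 * i) with hin | hin
  · left
    intro p hkp hpn
    have hip : min i (n - i) = n - i := by omega
    rw [hip] at hk
    have := hmix p (by omega)
    unfold mixc at this
    rw [if_pos (by omega), if_pos (by omega)] at this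
    exact this
  · right
    intro p hkp hpn
    have hip : min i (n - i) = i := by omega
    rw [hip] at hk
    have := hmix p (by omega)
    unfold mixc at this
    rw [if_neg (by omega), if_neg (by omega)] at this
    exact this

-- bridge: b[:n] and b agree character-wise below n (when n ≤ len b)
theorem chD_take (bl : List Char) (n p : Nat) (hp : p < n) :
    chD (bl.take n) p = chD bl p := by
  simp only [chD, List.getD_eq_getElem?_getD, List.getElem?_take, if_pos hp]

theorem mixc_congr (x x' y y' : List Char) (n i : Nat)
    (h1 : ∀ p, p < n → chD x p = chD x' p) (h2 : ∀ p, p < n → chD y p = chD y' p)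
    (p : Nat) (hp : p < n) : mixc x y i p = mixc x' y' i p := by
  unfold mixc
  split_ifs with h
  · exact h1 p hp
  · exact h2 p hp

theorem mixpal_congr (x x' y y' : List Char) (n i : Nat)
    (h1 : ∀ p, p < n → chD x p = chD x' p) (h2 : ∀ p, p < n → chD y p = chD y' p) :
    MixPal x y n i ↔ MixPal x' y' n i := by
  unfold MixPal
  refine forall_congr' fun p => imp_congr_right fun hp => ?_
  rw [mixc_congr x x' y y' n i h1 h2 p hp, mixc_congr x x' y y' n i h1 h2 _ (by omega)]

theorem palc_congr (s s' : List Char) (k n : Nat)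
    (h : ∀ p, p < n → chD s p = chD s' p) :
    PalC s k n ↔ PalC s' k n := by
  unfold PalC
  refine forall_congr' fun p => ?_
  constructor <;> intro hh hkp hpn <;> have := hh hkp hpn
  · rw [← h p (by omega), ← h _ (by omega)]; exact this
  · rw [h p (by omega), h _ (by omega)]; exact this

-- B = true iff some split's mix is a character-wise palindrome
theorem alt_iff (a b : String) (n : Nat) (hn : n = a.toList.length)
    (hbl : n ≤ b.toList.length) :
    checkPalindromeFormation1_alt a b = true ↔
      ∃ i, i ≤ n ∧ (MixPal a.toList (b.toList.take n) n i ∨ MixPal (b.toList.take n) a.toList n i) := by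
  unfold checkPalindromeFormation1_alt
  dsimp only
  rw [← hn]
  have hlb : (b.toList.take n).length = n := by rw [List.length_take]; omega
  rw [List.any_eq_true]
  constructor
  · rintro ⟨i, hi, hf⟩
    rw [List.mem_range] at hi
    rw [Bool.or_eq_true] at hf
    refine ⟨i, by omega, ?_⟩
    rcases hf with hf | hf
    · exact Or.inl ((mixpal_iff _ _ n i hn.symm hlb (by omega)).mp hf)
    · exact Or.inr ((mixpal_iff _ _ n i hlb hn.symm (by omega)).mp hf)
  · rintro ⟨i, hi, hf⟩
    refine ⟨i, List.mem_range.mpr (by omega), ?_⟩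
    rw [Bool.or_eq_true]
    rcases hf with hf | hf
    · exact Or.inl ((mixpal_iff _ _ n i hn.symm hlb (by omega)).mpr hf)
    · exact Or.inr ((mixpal_iff _ _ n i hlb hn.symm (by omega)).mpr hf)

-- ===== VERDICT (by name: the statement is the Claim_ definition above) =====
theorem checkPalindromeFormation1_spec : Claim_equal_checkPalindromeFormation1 := by
  intro a b _ hpre
  unfold Spec_checkPalindromeFormation1
  rcases Nat.lt_or_ge a.toList.length 2 with hsmall | hbig
  · -- n = 0 or n = 1: both sides are true
    rcases Nat.lt_or_ge a.toList.length 1 with h0 | h1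
    · have ha : a.toList = [] := List.length_eq_zero_iff.mp (by omega)
      have hA : checkPalindromeFormation1 a b = true := by
        unfold checkPalindromeFormation1
        dsimp only
        rw [ha]
        rw [if_neg (by norm_num)]
        rw [show pvLoopA [] b.toList 0 ((([] : List Char).length : Int) - 1) = (0, -1) from by
          rw [pvLoopA]; simp]
        dsimp only
        rw [show ((-1 : Int) + 1) = ((0 : Nat) : Int) from by omega,
            show ((0 : Int)) = ((0 : Nat) : Int) from by omega]
        rw [PySem.List.slice_natCast]
        simp
      have hB : checkPalindromeFormation1_alt a b = true := by
        unfold checkPalindromeFormation1_alt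
        dsimp only
        rw [ha]
        simp [pvPal]
      rw [hA, hB]
    · have hlen : a.toList.length = 1 := by omega
      obtain ⟨c, ha⟩ := List.length_eq_one_iff.mp hlen
      have hA : checkPalindromeFormation1 a b = true := by
        unfold checkPalindromeFormation1
        dsimp only
        rw [ha]
        rw [if_pos (by norm_num)]
      have hB : checkPalindromeFormation1_alt a b = true := by
        unfold checkPalindromeFormation1_alt
        dsimp only
        rw [ha]
        have hd : (b.toList.take ([c] : List Char).length).drop 1 = [] := by
          apply List.drop_eq_nil_of_le
          simp
        rw [List.any_eq_true]
        refine ⟨1, by simp, ?_⟩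
        rw [Bool.or_eq_true]
        left
        rw [show ([c] : List Char).take 1 = [c] from rfl, hd]
        simp [pvPal]
      rw [hA, hB]
  · -- main case: 2 ≤ n ≤ len b
    have hble : a.toList.length ≤ b.toList.length := by
      unfold Pre_checkPalindromeFormation1 at hpre
      omega
    obtain ⟨k1, -, hk12, hrec1, hm1, hstop1⟩ :=
      loopA_char a.toList b.toList a.toList.length a.toList.length 0 (by omega) (by omega)
    obtain ⟨k2, -, hk22, hrec2, hm2, hstop2⟩ :=
      loopA_char b.toList a.toList a.toList.length a.toList.length 0 (by omega) (by omega)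
    have hrec1' : pvLoopA a.toList b.toList 0 ((a.toList.length : Int) - 1) =
        ((k1 : Int), (a.toList.length : Int) - 1 - (k1 : Int)) := by
      simpa using hrec1
    have hrec2' : pvLoopA b.toList a.toList 0 ((a.toList.length : Int) - 1) =
        ((k2 : Int), (a.toList.length : Int) - 1 - (k2 : Int)) := by
      simpa using hrec2
    have hA : checkPalindromeFormation1 a b = true ↔
        (PalC a.toList k1 a.toList.length ∨ PalC b.toList k1 a.toList.length ∨
         PalC b.toList k2 a.toList.length ∨ PalC a.toList k2 a.toList.length) := by
      unfold checkPalindromeFormation1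
      dsimp only
      rw [if_neg (by omega), hrec1', hrec2']
      dsimp only
      rw [show (a.toList.length : Int) - 1 - (k1 : Int) + 1 = ((a.toList.length - k1 : Nat) : Int) from by omega,
          show (a.toList.length : Int) - 1 - (k2 : Int) + 1 = ((a.toList.length - k2 : Nat) : Int) from by omega]
      rw [Bool.or_eq_true, Bool.or_eq_true, Bool.or_eq_true]
      rw [slicepal_iff a.toList k1 a.toList.length hk12 (by omega),
          slicepal_iff b.toList k1 a.toList.length hk12 (by omega),
          slicepal_iff b.toList k2 a.toList.length hk22 (by omega),
          slicepal_iff a.toList k2 a.toList.length hk22 (by omega)]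
      tauto
    have hbr : ∀ p, p < a.toList.length → chD (b.toList.take a.toList.length) p = chD b.toList p :=
      fun p hp => chD_take b.toList a.toList.length p hp
    have hid : ∀ p, p < a.toList.length → chD a.toList p = chD a.toList p := fun _ _ => rfl
    have hm1' : ∀ p, p < k1 → chD a.toList p = chD (b.toList.take a.toList.length) (a.toList.length - 1 - p) := by
      intro p hp
      rw [hbr _ (by omega)]
      exact hm1 p (Nat.zero_le p) hp
    have hm2' : ∀ p, p < k2 → chD (b.toList.take a.toList.length) p = chD a.toList (a.toList.length - 1 - p) := by
      intro p hp
      rw [hbr _ (by omega)]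
      exact hm2 p (Nat.zero_le p) hp
    have hpcbr : ∀ k, PalC b.toList k a.toList.length ↔ PalC (b.toList.take a.toList.length) k a.toList.length :=
      fun k => (palc_congr b.toList (b.toList.take a.toList.length) k a.toList.length
        (fun p hp => (hbr p hp).symm))
    rw [Bool.eq_iff_iff, hA, alt_iff a b a.toList.length rfl hble]
    constructor
    · rintro (h | h | h | h)
      · obtain ⟨i, hi, hmx⟩ := fwd a.toList (b.toList.take a.toList.length) a.toList.length k1 hk12 hm1' (Or.inl h)
        exact ⟨i, hi, Or.inl hmx⟩
      · obtain ⟨i, hi, hmx⟩ := fwd a.toList (b.toList.take a.toList.length) a.toList.length k1 hk12 hm1' (Or.inr ((hpcbr k1).mp h))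
        exact ⟨i, hi, Or.inl hmx⟩
      · obtain ⟨i, hi, hmx⟩ := fwd (b.toList.take a.toList.length) a.toList a.toList.length k2 hk22 hm2' (Or.inl ((hpcbr k2).mp h))
        exact ⟨i, hi, Or.inr hmx⟩
      · obtain ⟨i, hi, hmx⟩ := fwd (b.toList.take a.toList.length) a.toList a.toList.length k2 hk22 hm2' (Or.inr h)
        exact ⟨i, hi, Or.inr hmx⟩
    · rintro ⟨i, hi, hmx | hmx⟩
      · have hmx' : MixPal a.toList b.toList a.toList.length i :=
          (mixpal_congr a.toList a.toList (b.toList.take a.toList.length) b.toList a.toList.length i hid hbr).mp hmx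
        rcases bwd a.toList b.toList a.toList.length k1 i hi hk12 hstop1 hmx' with h | h
        · exact Or.inl h
        · exact Or.inr (Or.inl h)
      · have hmx' : MixPal b.toList a.toList a.toList.length i :=
          (mixpal_congr (b.toList.take a.toList.length) b.toList a.toList a.toList a.toList.length i hbr hid).mp hmx
        rcases bwd b.toList a.toList a.toList.length k2 i hi hk22 hstop2 hmx' with h | h
        · exact Or.inr (Or.inr (Or.inl h))
        · exact Or.inr (Or.inr (Or.inr h))
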